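-- pv_equiv track=rewrite | github.com/AnarielSurbito/univer | aois/lab3/formul.py | check_ans
-- ===== SOURCE A (Python) =====
-- def check_ans(answ: list):
--     ones = []
--     one = 0
--     for el in range(len(answ[0])):
--         ones.append(0)
--     for el in range(len(answ)):
--         for i in range(len(answ[el])):
--             if answ[el][i] == 1 and ones[i] == 0:
--                 ones[i] = 1
--                 one += 1
--     if one == len(answ[0]):
--         return True
--     else:
--         return False
-- ===== SOURCE B (Python) =====
-- def check_ans(answ: list):
--     n = len(answ[0])
--     return all(any(len(row) > j and row[j] == 1 for row in answ) for j in range(n))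
-- ===== Notes on version B (the rewrite author's own statement) =====
-- stated objective: idiomatic
-- what changed: B replaces A's row-major scan with a marker array and a distinct-column counter by a direct column-major all/any: every column index j < len(answ[0]) must have some row with row[j] == 1 (guarded by j < len(row) for short rows, exactly the columns A can mark); any/all short-circuit at the first 1 per column and no marker list or counter is maintained.
import Mathlib
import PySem

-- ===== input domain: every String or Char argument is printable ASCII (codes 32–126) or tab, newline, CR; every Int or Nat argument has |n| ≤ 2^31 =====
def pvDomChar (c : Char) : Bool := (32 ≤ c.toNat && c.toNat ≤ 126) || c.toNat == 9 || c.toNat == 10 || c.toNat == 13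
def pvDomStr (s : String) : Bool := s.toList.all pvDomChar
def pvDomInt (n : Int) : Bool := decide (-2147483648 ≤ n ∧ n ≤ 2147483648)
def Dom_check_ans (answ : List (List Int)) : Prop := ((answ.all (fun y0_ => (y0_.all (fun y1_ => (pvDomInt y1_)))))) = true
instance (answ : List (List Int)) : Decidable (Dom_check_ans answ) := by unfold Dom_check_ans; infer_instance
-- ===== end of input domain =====

-- B re-states A's marker-array-and-counter scan as an idiomatic column-major all/any check
-- (same cost, no marker list, no counter); equivalence of return values is proved on Pre_.


-- ===== PORT A =====
-- answ[0] is PySem.List.pyGetD answ 0 []; Pre_ excludes the inputs where Python raises.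
def check_ans (answ : List (List Int)) : Bool :=
  let ones : List Int :=
    (PySem.List.pyRange 0 ((PySem.List.pyGetD answ 0 []).length : Int) 1).foldl
      (fun acc _ => acc ++ [(0 : Int)]) []
  let st : List Int × Int :=
    (PySem.List.pyRange 0 (answ.length : Int) 1).foldl
      (fun st el =>
        (PySem.List.pyRange 0 ((PySem.List.pyGetD answ el []).length : Int) 1).foldl
          (fun st i =>
            if PySem.List.pyGetD (PySem.List.pyGetD answ el []) i 0 = 1 ∧
                PySem.List.pyGetD st.1 i 0 = 0 then
              (PySem.List.pySetD st.1 i 1, st.2 + 1)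
            else st)
          st)
      (ones, 0)
  if st.2 = ((PySem.List.pyGetD answ 0 []).length : Int) then true else false

-- ===== PORT B =====
def check_ans_alt (answ : List (List Int)) : Bool :=
  (PySem.List.pyRange 0 ((PySem.List.pyGetD answ 0 []).length : Int) 1).all
    (fun j => answ.any (fun row =>
      decide ((row.length : Int) > j) && decide (PySem.List.pyGetD row j 0 = 1)))

-- ===== PRECONDITION & SPEC =====
-- Pre_ excludes exactly the inputs where Python A raises IndexError: the empty list
-- (answ[0]) and matrices where some row holds a 1 at a column index ≥ len(answ[0])
-- (there ones[i] is out of range).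
def Pre_check_ans (answ : List (List Int)) : Prop :=
  answ ≠ [] ∧ ∀ row ∈ answ, (1 : Int) ∉ row.drop (PySem.List.pyGetD answ 0 []).length
instance (answ : List (List Int)) : Decidable (Pre_check_ans answ) := by
  unfold Pre_check_ans; infer_instance

def pvWitness_check_ans : List (List Int) := [[1, 0], [0, 1]]

def Spec_check_ans (answ : List (List Int)) (out : Bool) : Prop := out = check_ans_alt answ
instance (answ : List (List Int)) (out : Bool) : Decidable (Spec_check_ans answ out) := by
  unfold Spec_check_ans; infer_instance

-- ===== CLAIM (what is proved, stated in full; the proofs are below) =====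
def Claim_equal_check_ans : Prop := ∀ (answ : List (List Int)), Dom_check_ans answ →
  Pre_check_ans answ → Spec_check_ans answ (check_ans answ)

-- ===== LEMMAS AND PROOFS =====

-- the body of A's inner loop, and one whole inner loop (one row)
def innerStep (row : List Int) (st : List Int × Int) (i : Int) : List Int × Int :=
  if PySem.List.pyGetD row i 0 = 1 ∧ PySem.List.pyGetD st.1 i 0 = 0 then
    (PySem.List.pySetD st.1 i 1, st.2 + 1)
  else st

def rowPass (st : List Int × Int) (row : List Int) : List Int × Int :=
  (PySem.List.pyRange 0 (row.length : Int) 1).foldl (innerStep row) st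

lemma repl_fold (m : Nat) (acc : List Int) :
    (PySem.List.pyRange 0 (m : Int) 1).foldl (fun acc _ => acc ++ [(0 : Int)]) acc
      = acc ++ List.replicate m 0 := by
  induction m generalizing acc with
  | zero => simp [PySem.List.pyRange_one_eq_nil]
  | succ k ih =>
    rw [show ((k + 1 : Nat) : Int) = (k : Int) + 1 by push_cast; ring,
      PySem.List.pyRange_one_succ_right (by positivity), List.foldl_append, ih]
    simp [List.replicate_succ']

lemma getD_one_lt (row : List Int) (n : Nat) (h : (1 : Int) ∉ row.drop n) :
    ∀ j : Nat, row.getD j 0 = 1 → j < n := by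
  intro j hj
  by_contra hge
  have hjlen : j < row.length := by
    by_contra hl
    rw [List.getD_eq_default] at hj; · omega
    omega
  have : row[j] = 1 := by rwa [List.getD_eq_getElem _ _ hjlen] at hj
  apply h
  have hq : (List.drop n row)[j - n]? = some 1 := by
    rw [List.getElem?_drop, show n + (j - n) = j from by omega,
      List.getElem?_eq_getElem hjlen, this]
  exact List.mem_of_getElem? hq

lemma countP_or (l : List Nat) (p q : Nat → Bool) :
    l.countP (fun j => p j || q j) = l.countP p + l.countP (fun j => q j && !p j) := by
  induction l with
  | nil => simp
  | cons a t ih =>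
    simp only [List.countP_cons, ih]
    cases hp : p a <;> cases hq : q a <;> simp <;> omega

lemma countP_range_le (p : Nat → Bool) (a b : Nat) (hab : a ≤ b) (h : ∀ j, p j = true → j < a) :
    (List.range b).countP p = (List.range a).countP p := by
  induction b, hab using Nat.le_induction with
  | base => rfl
  | succ k hk ih =>
    rw [List.range_succ, List.countP_append, ih]
    have : p k = false := by
      cases hpk : p k
      · rfl
      · exact absurd (h k hpk) (by omega)
    simp [this]

lemma countP_range_eq (p : Nat → Bool) (a b : Nat) (h : ∀ j, p j = true → j < a ∧ j < b) :
    (List.range a).countP p = (List.range b).countP p := by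
  rcases Nat.le_total a b with hab | hab
  · rw [countP_range_le p a b hab (fun j hj => (h j hj).1)]
  · rw [countP_range_le p b a hab (fun j hj => (h j hj).2)]

lemma rowPass_char (row os : List Int) (c : Int)
    (h : ∀ j : Nat, row.getD j 0 = 1 → j < os.length)
    (h01 : ∀ j : Nat, os.getD j 0 = 0 ∨ os.getD j 0 = 1) :
    ∀ m : Nat,
      ((PySem.List.pyRange 0 (m : Int) 1).foldl (innerStep row) (os, c)).1.length = os.length ∧
      (∀ j : Nat,
        ((PySem.List.pyRange 0 (m : Int) 1).foldl (innerStep row) (os, c)).1.getD j 0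
          = if j < m ∧ row.getD j 0 = 1 then 1 else os.getD j 0) ∧
      ((PySem.List.pyRange 0 (m : Int) 1).foldl (innerStep row) (os, c)).2
        = c + (((List.range m).countP
            (fun j => decide (row.getD j 0 = 1) && decide (os.getD j 0 = 0))) : Int) := by
  intro m
  induction m with
  | zero =>
    simp [PySem.List.pyRange_one_eq_nil]
  | succ m ih =>
    obtain ⟨ih1, ih2, ih3⟩ := ih
    rw [show ((m + 1 : Nat) : Int) = (m : Int) + 1 by push_cast; ring,
      PySem.List.pyRange_one_succ_right (by positivity), List.foldl_append] at *
    set r := (PySem.List.pyRange 0 (m : Int) 1).foldl (innerStep row) (os, c) with hr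
    simp only [List.foldl_cons, List.foldl_nil]
    have hget1 : PySem.List.pyGetD row (m : Int) 0 = row.getD m 0 := by
      simp [PySem.List.pyGetD_natCast]
    have hget2 : PySem.List.pyGetD r.1 (m : Int) 0 = os.getD m 0 := by
      rw [PySem.List.pyGetD_natCast, ih2 m]
      simp
    by_cases hcond : row.getD m 0 = 1 ∧ os.getD m 0 = 0
    · have hmlt : m < os.length := h m hcond.1
      have hstep : innerStep row r (m : Int) = (r.1.set m 1, r.2 + 1) := by
        rw [innerStep, if_pos (by rw [hget1, hget2]; exact hcond : PySem.List.pyGetD row (m : Int) 0 = 1 ∧ PySem.List.pyGetD r.1 (m : Int) 0 = 0)]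
        simp [PySem.List.pySetD_natCast]
      rw [hstep]
      refine ⟨by simpa using ih1, fun j => ?_, ?_⟩
      · by_cases hjm : j = m
        · subst hjm
          rw [show (r.1.set j 1).getD j 0 = 1 by
            simp [List.getD_eq_getElem?_getD, ih1, hmlt]]
          rw [if_pos ⟨by omega, hcond.1⟩]
        · rw [show (r.1.set m 1).getD j 0 = r.1.getD j 0 by
            rw [List.getD_eq_getElem?_getD, List.getD_eq_getElem?_getD,
              List.getElem?_set_ne (show m ≠ j from fun e => hjm e.symm)]]
          rw [ih2 j]
          by_cases hlt : j < m ∧ row.getD j 0 = 1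
          · rw [if_pos hlt, if_pos ⟨by omega, hlt.2⟩]
          · rw [if_neg hlt, if_neg (by rintro ⟨h1, h2⟩; exact hlt ⟨by omega, h2⟩)]
      · simp only [ih3, List.range_succ, List.countP_append, List.countP_cons, List.countP_nil]
        rw [decide_eq_true hcond.1, decide_eq_true hcond.2]
        simp only [Bool.and_self, if_pos]
        push_cast; ring
    · have hstep : innerStep row r (m : Int) = r := by
        rw [innerStep, if_neg (by rw [hget1, hget2]; exact hcond : ¬(PySem.List.pyGetD row (m : Int) 0 = 1 ∧ PySem.List.pyGetD r.1 (m : Int) 0 = 0))]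
      rw [hstep]
      refine ⟨ih1, fun j => ?_, ?_⟩
      · rw [ih2 j]
        by_cases hjm : j = m
        · subst hjm
          rw [if_neg (by omega)]
          by_cases h1 : row.getD j 0 = 1
          · have : os.getD j 0 = 1 := by
              rcases h01 j with h0 | h0
              · exact absurd ⟨h1, h0⟩ hcond
              · exact h0
            rw [if_pos ⟨by omega, h1⟩, this]
          · rw [if_neg (by rintro ⟨_, h2⟩; exact h1 h2)]
        · by_cases hlt : j < m ∧ row.getD j 0 = 1
          · rw [if_pos hlt, if_pos ⟨by omega, hlt.2⟩]
          · rw [if_neg hlt, if_neg (by rintro ⟨h1, h2⟩; exact hlt ⟨by omega, h2⟩)]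
      · simp only [ih3, List.range_succ, List.countP_append, List.countP_cons, List.countP_nil]
        rw [show (decide (row.getD m 0 = 1) && decide (os.getD m 0 = 0)) = false by
          rcases Decidable.not_and_iff_not_or_not.mp hcond with h1 | h1
          · rw [decide_eq_false h1, Bool.false_and]
          · rw [decide_eq_false h1, Bool.and_false]]
        simp only [Bool.false_eq_true, if_false]
        push_cast; ring

lemma getD_one_lt_len (row : List Int) (j : Nat) (h : row.getD j 0 = 1) : j < row.length := by
  by_contra hl
  rw [List.getD_eq_default] at h
  · exact absurd h (by norm_num)
  · omega

lemma outer_char (n : Nat) :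
    ∀ (rows : List (List Int)) (P : Nat → Bool) (os : List Int) (c : Int),
      (∀ row ∈ rows, (1 : Int) ∉ row.drop n) →
      os.length = n →
      (∀ j : Nat, os.getD j 0 = if P j then 1 else 0) →
      (∀ j : Nat, P j = true → j < n) →
      c = (((List.range n).countP P) : Int) →
      (rows.foldl rowPass (os, c)).1.length = n ∧
      (∀ j : Nat, (rows.foldl rowPass (os, c)).1.getD j 0
        = if (P j || rows.any (fun row => decide (row.getD j 0 = 1))) then 1 else 0) ∧
      (rows.foldl rowPass (os, c)).2
        = (((List.range n).countP
            (fun j => P j || rows.any (fun row => decide (row.getD j 0 = 1)))) : Int) := by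
  intro rows
  induction rows with
  | nil =>
    intro P os c _ hlen hchar _ hc
    refine ⟨hlen, fun j => ?_, ?_⟩
    · simpa using hchar j
    · simpa using hc
  | cons row rest ih =>
    intro P os c hdrop hlen hchar hP hc
    have hrow : ∀ j : Nat, row.getD j 0 = 1 → j < n :=
      getD_one_lt row n (hdrop row (List.mem_cons_self))
    have h01 : ∀ j : Nat, os.getD j 0 = 0 ∨ os.getD j 0 = 1 := by
      intro j; rw [hchar j]; by_cases hp : P j <;> simp [hp]
    obtain ⟨c1, c2, c3⟩ := rowPass_char row os c
      (fun j hj => hlen ▸ hrow j hj) h01 row.length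
    rw [List.foldl_cons]
    have hrp : rowPass (os, c) row
        = ((PySem.List.pyRange 0 (row.length : Int) 1).foldl (innerStep row) (os, c)) := rfl
    set os' := ((PySem.List.pyRange 0 (row.length : Int) 1).foldl (innerStep row) (os, c)).1
    set c' := ((PySem.List.pyRange 0 (row.length : Int) 1).foldl (innerStep row) (os, c)).2
    have hpair : rowPass (os, c) row = (os', c') := rfl
    rw [hpair]
    have hchar' : ∀ j : Nat, os'.getD j 0
        = if (P j || decide (row.getD j 0 = 1)) then 1 else 0 := by
      intro j
      rw [c2 j, hchar j]
      by_cases h1 : row.getD j 0 = 1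
      · rw [if_pos ⟨getD_one_lt_len row j h1, h1⟩, decide_eq_true h1, Bool.or_true]
        simp
      · rw [if_neg (by rintro ⟨_, h2⟩; exact h1 h2), decide_eq_false h1, Bool.or_false]
    have hP' : ∀ j : Nat, (P j || decide (row.getD j 0 = 1)) = true → j < n := by
      intro j hj
      rcases Bool.or_eq_true_iff.mp hj with h1 | h1
      · exact hP j h1
      · exact hrow j (of_decide_eq_true h1)
    have hc' : c' = (((List.range n).countP (fun j => P j || decide (row.getD j 0 = 1))) : Int) := by
      rw [c3, hc]
      rw [countP_or (List.range n) P (fun j => decide (row.getD j 0 = 1))]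
      have heq : ((List.range row.length).countP
            (fun j => decide (row.getD j 0 = 1) && decide (os.getD j 0 = 0)))
          = ((List.range n).countP (fun j => decide (row.getD j 0 = 1) && !P j)) := by
        have hfun : (fun j => decide (row.getD j 0 = 1) && decide (os.getD j 0 = 0))
            = (fun j => decide (row.getD j 0 = 1) && !P j) := by
          funext j
          rw [hchar j]
          by_cases hp : P j <;> simp [hp]
        rw [hfun]
        exact countP_range_eq _ row.length n (by
          intro j hj
          have h1 := (Bool.and_eq_true_iff.mp hj).1
          have h1' := of_decide_eq_true h1
          exact ⟨getD_one_lt_len row j h1', hrow j h1'⟩)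
      rw [heq]
      push_cast; ring
    have := ih (fun j => P j || decide (row.getD j 0 = 1)) os' c'
      (fun r hr => hdrop r (List.mem_cons_of_mem _ hr))
      (by rw [c1, hlen]) hchar' hP' hc'
    obtain ⟨r1, r2, r3⟩ := this
    refine ⟨r1, fun j => ?_, ?_⟩
    · rw [r2 j]
      simp [List.any_cons, Bool.or_assoc]
    · rw [r3]
      congr 1
      apply List.countP_congr
      intro j _
      simp [List.any_cons, Bool.or_assoc]

-- ===== VERDICT (by name: the statement is the Claim_ definition above) =====
theorem check_ans_spec : Claim_equal_check_ans := by
  intro answ _ hpre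
  obtain ⟨hne, hdrop⟩ := hpre
  unfold Spec_check_ans
  set n := (PySem.List.pyGetD answ 0 []).length with hn
  set Pf : Nat → Bool := fun k => answ.any (fun row => decide (row.getD k 0 = 1)) with hPf
  have hA : check_ans answ
      = (if (answ.foldl rowPass (List.replicate n 0, 0)).2 = (n : Int) then true else false) := by
    simp only [check_ans]
    rw [repl_fold n [], List.nil_append]
    rw [show (fun (st : List Int × Int) (el : Int) =>
          (PySem.List.pyRange 0 ((PySem.List.pyGetD answ el []).length : Int) 1).foldl
            (fun st i =>
              if PySem.List.pyGetD (PySem.List.pyGetD answ el []) i 0 = 1 ∧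
                  PySem.List.pyGetD st.1 i 0 = 0 then
                (PySem.List.pySetD st.1 i 1, st.2 + 1)
              else st) st)
        = (fun acc el => rowPass acc (PySem.List.pyGetD answ el [])) from rfl]
    rw [PySem.List.foldl_pyRange_zero_pyGetD' answ [] rowPass (List.replicate n 0, 0)]
  obtain ⟨o1, o2, o3⟩ := outer_char n answ (fun _ => false) (List.replicate n 0) 0 hdrop
    (by simp)
    (by intro j
        rw [List.getD_eq_getElem?_getD, List.getElem?_replicate]
        split <;> rfl)
    (by intro j h; exact absurd h (by simp))
    (by simp)
  have key : (((List.range n).countP Pf) = n) ↔ (∀ k, k < n → Pf k = true) := by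
    constructor
    · intro h k hk
      have := List.countP_eq_length.mp (by rw [h, List.length_range])
      exact this k (List.mem_range.mpr hk)
    · intro h
      rw [List.countP_eq_length.mpr (fun k hk => h k (List.mem_range.mp hk)), List.length_range]
  have hpred : ∀ k : Nat,
      (answ.any (fun row => decide ((row.length : Int) > (k : Int)) &&
        decide (PySem.List.pyGetD row (k : Int) 0 = 1))) = Pf k := by
    intro k
    have hfun : (fun row : List Int => decide ((row.length : Int) > (k : Int)) &&
          decide (PySem.List.pyGetD row (k : Int) 0 = 1))
        = (fun row : List Int => decide (row.getD k 0 = 1)) := by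
      funext row
      rw [PySem.List.pyGetD_natCast]
      by_cases h1 : row.getD k 0 = 1
      · rw [decide_eq_true h1,
          decide_eq_true (show (row.length : Int) > (k : Int) by
            exact_mod_cast getD_one_lt_len row k h1), Bool.true_and]
      · rw [decide_eq_false h1, Bool.and_false]
    rw [hPf, hfun]
  have hB : (check_ans_alt answ = true) ↔ (∀ k, k < n → Pf k = true) := by
    unfold check_ans_alt
    rw [List.all_eq_true]
    constructor
    · intro h k hk
      have hm : (k : Int) ∈ PySem.List.pyRange 0 (n : Int) 1 := by
        rw [PySem.List.mem_pyRange_one]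
        constructor <;> omega
      have := h (k : Int) hm
      rwa [hpred k] at this
    · intro h j hj
      rw [PySem.List.mem_pyRange_one] at hj
      obtain ⟨h0, h1⟩ := hj
      have hjk : j = ((j.toNat : Nat) : Int) := by omega
      rw [hjk, hpred j.toNat]
      exact h j.toNat (by omega)
  rw [hA, o3]
  have hPfin : (fun j => false || answ.any (fun row => decide (row.getD j 0 = 1))) = Pf := by
    funext j; rw [Bool.false_or, hPf]
  rw [hPfin]
  by_cases hall : ∀ k, k < n → Pf k = true
  · rw [if_pos (by exact_mod_cast key.mpr hall)]
    exact ((hB.mpr hall)).symm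
  · rw [if_neg (fun hc => hall (key.mp (by exact_mod_cast hc)))]
    cases hBv : check_ans_alt answ
    · rfl
    · exact absurd (hB.mp hBv) hall
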